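-- pv_equiv track=rewrite | github.com/Uni-WangZexin/ChatAD | ts_ano_dataset/vllm_eval.py | refine_prediction
-- ===== SOURCE A (Python) =====
-- def refine_prediction(label, predict):
--     n = len(label)
--     refined_predict = predict[:]
--
--     def find_intervals(arr):
--         intervals = []
--         start = None
--         for i in range(len(arr)):
--             if arr[i] == 1 and start is None:
--                 start = i
--             elif arr[i] == 0 and start is not None:
--                 intervals.append((start, i - 1))
--                 start = None
--         if start is not None:  # 处理最后一个区间
--             intervals.append((start, len(arr) - 1))
--         return intervals
--
--     label_intervals = find_intervals(label)
--     predict_intervals = find_intervals(predict)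
--
--     # 对每个 label 区间进行匹配调整
--     for a, b in label_intervals:
--         for c, d in predict_intervals:
--             # 如果 predict 区间完全包含 label 区间
--             if c <= a and d >= b:
--                 # 将 predict 区间缩小为 label 区间
--                 for i in range(c, d + 1):
--                     refined_predict[i] = 0  # 先清零
--                 for i in range(a, b + 1):
--                     refined_predict[i] = 1  # 再赋值为 1
--
--     return refined_predict
-- ===== SOURCE B (Python) =====
-- def refine_prediction(label, predict):
--     def _intervals(arr):
--         res = []
--         start = None
--         for i, v in enumerate(arr):
--             if start is None:
--                 if v == 1:
--                     start = i
--             elif v == 0: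
--                 res.append((start, i - 1))
--                 start = None
--         if start is not None:
--             res.append((start, len(arr) - 1))
--         return res
--
--     L = _intervals(label)
--     out = list(predict)
--     j = 0
--     for c, d in _intervals(predict):
--         best = None
--         # two-pointer: label intervals ending at or before d are settled here
--         while j < len(L) and L[j][1] <= d:
--             if L[j][0] >= c:
--                 best = L[j]
--             j += 1
--         if best is not None:
--             a, b = best
--             out[c:a] = [0] * (a - c)
--             out[a:b + 1] = [1] * (b + 1 - a)
--             out[b + 1:d + 1] = [0] * (d - b)
--     return out
-- ===== Notes on version B (the rewrite author's own statement) =====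
-- stated objective: alternative
-- what changed: A matches every label interval against every predict interval with nested loops (rewriting a whole predict interval element-by-element for each match); B walks the two sorted disjoint interval lists once with a two-pointer sweep, rewriting each predict interval at most once with its last contained label interval via slice assignments.
import Mathlib
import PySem

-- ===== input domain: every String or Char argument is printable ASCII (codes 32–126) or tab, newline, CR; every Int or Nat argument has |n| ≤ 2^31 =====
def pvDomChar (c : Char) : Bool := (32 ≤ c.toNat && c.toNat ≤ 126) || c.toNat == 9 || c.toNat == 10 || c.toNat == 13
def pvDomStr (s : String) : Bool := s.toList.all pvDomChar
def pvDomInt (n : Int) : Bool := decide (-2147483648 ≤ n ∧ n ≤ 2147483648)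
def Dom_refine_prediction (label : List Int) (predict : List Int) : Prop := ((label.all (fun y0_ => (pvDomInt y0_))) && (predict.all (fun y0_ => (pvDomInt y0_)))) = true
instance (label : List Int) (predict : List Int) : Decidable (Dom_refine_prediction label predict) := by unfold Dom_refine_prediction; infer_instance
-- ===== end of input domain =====

-- B replaces A's label×predict nested loops (each match rewriting a whole predict interval)
-- by a single two-pointer sweep over the two sorted interval lists: each predict interval is
-- rewritten at most once, by its last fully contained label interval.

-- ===== PORT A =====
-- A's find_intervals: scan the indices with a running `start`
def pvFindIntervalsA (arr : List Int) : List (Int × Int) :=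
  let s := (PySem.List.pyRange 0 arr.length 1).foldl
    (fun (s : List (Int × Int) × Option Int) i =>
      match s.2 with
      | none => if PySem.List.pyGetD arr i 0 = 1 then (s.1, some i) else s
      | some st => if PySem.List.pyGetD arr i 0 = 0 then (s.1 ++ [(st, i - 1)], none) else s)
    ([], none)
  match s.2 with
  | none => s.1
  | some st => s.1 ++ [(st, (arr.length : Int) - 1)]

def refine_prediction (label : List Int) (predict : List Int) : List Int :=
  let refined := predict
  let labelIntervals := pvFindIntervalsA label
  let predictIntervals := pvFindIntervalsA predict
  labelIntervals.foldl (fun rp ab =>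
    predictIntervals.foldl (fun rp cd =>
      if cd.1 ≤ ab.1 ∧ cd.2 ≥ ab.2 then
        let rp1 := (PySem.List.pyRange cd.1 (cd.2 + 1) 1).foldl
          (fun r i => PySem.List.pySetD r i 0) rp
        (PySem.List.pyRange ab.1 (ab.2 + 1) 1).foldl
          (fun r i => PySem.List.pySetD r i 1) rp1
      else rp) rp) refined

-- ===== PORT B =====
-- B's _intervals: fold over enumerate(arr)
def pvIntervalsB (arr : List Int) : List (Int × Int) :=
  let s := (PySem.List.enumerate arr 0).foldl
    (fun (s : List (Int × Int) × Option Int) (iv : Int × Int) =>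
      match s.2 with
      | none => if iv.2 = 1 then (s.1, some iv.1) else s
      | some st => if iv.2 = 0 then (s.1 ++ [(st, iv.1 - 1)], none) else s)
    ([], none)
  match s.2 with
  | none => s.1
  | some st => s.1 ++ [(st, (arr.length : Int) - 1)]

-- B's inner while loop: consume label intervals ending at or before d, keep the last contained one
def pvScan (c d : Int) (best : Option (Int × Int)) :
    List (Int × Int) → Option (Int × Int) × List (Int × Int)
  | [] => (best, [])
  | ab :: rest =>
    if ab.2 ≤ d then pvScan c d (if c ≤ ab.1 then some ab else best) rest
    else (best, ab :: rest)

-- B's three slice assignments: out[c:a]=[0]*(a-c); out[a:b+1]=[1]*(b+1-a); out[b+1:d+1]=[0]*(d-b)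
def pvFillSeg (out : List Int) (c a b d : Int) : List Int :=
  let o1 := out.take c.toNat ++ List.replicate (a - c).toNat 0 ++ out.drop a.toNat
  let o2 := o1.take a.toNat ++ List.replicate (b + 1 - a).toNat 1 ++ o1.drop (b + 1).toNat
  o2.take (b + 1).toNat ++ List.replicate (d - b).toNat 0 ++ o2.drop (d + 1).toNat

def refine_prediction_alt (label : List Int) (predict : List Int) : List Int :=
  let L := pvIntervalsB label
  ((pvIntervalsB predict).foldl
    (fun (s : List Int × List (Int × Int)) cd =>
      match pvScan cd.1 cd.2 none s.2 with
      | (some ab, rest) => (pvFillSeg s.1 cd.1 ab.1 ab.2 cd.2, rest)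
      | (none, rest) => (s.1, rest))
    (predict, L)).1

-- ===== PRECONDITION & SPEC =====
def Spec_refine_prediction (label : List Int) (predict : List Int) (out : List Int) : Prop := out = refine_prediction_alt label predict
instance (label : List Int) (predict : List Int) (out : List Int) : Decidable (Spec_refine_prediction label predict out) := by unfold Spec_refine_prediction; infer_instance

-- ===== CLAIM (what is proved, stated in full; the proofs are below) =====
def Claim_equal_refine_prediction : Prop := ∀ (label : List Int) (predict : List Int), Dom_refine_prediction label predict → Spec_refine_prediction label predict (refine_prediction label predict)

-- ===== LEMMAS AND PROOFS =====

def ivRec : List Int → Int → Option Int → List (Int × Int)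
  | [], _, none => []
  | [], i, some st => [(st, i - 1)]
  | v :: rest, i, none =>
      if v = 1 then ivRec rest (i + 1) (some i) else ivRec rest (i + 1) none
  | v :: rest, i, some st =>
      if v = 0 then (st, i - 1) :: ivRec rest (i + 1) none else ivRec rest (i + 1) (some st)

theorem ivRec_fold (xs : List Int) : ∀ (i : Int) (acc : List (Int × Int)) (start : Option Int),
    (let s := (PySem.List.enumerate xs i).foldl
      (fun (s : List (Int × Int) × Option Int) (iv : Int × Int) =>
        match s.2 with
        | none => if iv.2 = 1 then (s.1, some iv.1) else s
        | some st => if iv.2 = 0 then (s.1 ++ [(st, iv.1 - 1)], none) else s)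
      (acc, start);
     match s.2 with
     | none => s.1
     | some st => s.1 ++ [(st, i + xs.length - 1)]) = acc ++ ivRec xs i start := by
  induction xs with
  | nil =>
    intro i acc start
    cases start <;> simp [ivRec, PySem.List.enumerate]
  | cons v rest ih =>
    intro i acc start
    have hlen : i + ((v :: rest).length : Int) - 1 = (i + 1) + (rest.length : Int) - 1 := by
      simp only [List.length_cons]; push_cast; ring
    simp only [PySem.List.enumerate_cons, List.foldl_cons, hlen]
    cases start with
    | none =>
      by_cases hv : v = 1
      · simpa [ivRec, hv] using ih (i+1) acc (some i)
      · simpa [ivRec, hv] using ih (i+1) acc none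
    | some st =>
      by_cases hv : v = 0
      · simpa [ivRec, hv] using ih (i+1) (acc ++ [(st, i - 1)]) none
      · simpa [ivRec, hv] using ih (i+1) acc (some st)

theorem intervalsB_eq_ivRec (arr : List Int) : pvIntervalsB arr = ivRec arr 0 none := by
  have h := ivRec_fold arr 0 [] none
  simpa [pvIntervalsB] using h

theorem intervalsA_eq_ivRec (arr : List Int) : pvFindIntervalsA arr = ivRec arr 0 none := by
  have h := ivRec_fold arr 0 [] none
  rw [PySem.List.enumerate_eq_map_pyRange arr 0, List.foldl_map] at h
  simpa [pvFindIntervalsA, PySem.List.len] using h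

theorem ivRec_props (xs : List Int) : ∀ (i : Int) (start : Option Int), 0 ≤ i →
    (∀ st, start = some st → 0 ≤ st ∧ st + 1 ≤ i) →
    ((∀ p ∈ ivRec xs i start,
        (match start with | some st => st | none => i) ≤ p.1 ∧
        0 ≤ p.1 ∧ p.1 ≤ p.2 ∧ p.2 < i + xs.length) ∧
     (ivRec xs i start).Pairwise (fun p q => p.2 < q.1)) := by
  induction xs with
  | nil =>
    intro i start hi hst
    cases start with
    | none => simp [ivRec]
    | some st =>
      obtain ⟨h0, h1⟩ := hst st rfl
      simp [ivRec]
      omega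
  | cons v rest ih =>
    intro i start hi hst
    cases start with
    | none =>
      by_cases hv : v = 1
      · have h := ih (i+1) (some i) (by omega) (by intro st h; cases h; omega)
        simp only [ivRec, hv] at *
        refine ⟨fun p hp => ?_, h.2⟩
        have := h.1 p hp
        simp only [List.length_cons] at *
        push_cast at *
        omega
      · have h := ih (i+1) none (by omega) (by intro st h; cases h)
        simp only [ivRec, hv] at *
        refine ⟨fun p hp => ?_, h.2⟩
        have := h.1 p hp
        simp only [List.length_cons] at *
        push_cast at *
        omega
    | some st =>
      obtain ⟨h0, h1⟩ := hst st rfl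
      by_cases hv : v = 0
      · have h := ih (i+1) none (by omega) (by intro st h; cases h)
        simp only [ivRec, hv]
        constructor
        · intro p hp
          rcases List.mem_cons.mp hp with rfl | hp
          · simp only [List.length_cons]; push_cast; omega
          · have := h.1 p hp
            simp only [List.length_cons] at *
            push_cast at *
            omega
        · refine List.pairwise_cons.mpr ⟨fun q hq => ?_, h.2⟩
          have hq2 := h.1 q hq
          simp only at hq2
          omega
      · have h := ih (i+1) (some st) (by omega) (by intro st' h'; cases h'; omega)
        simp only [ivRec, hv]
        refine ⟨fun p hp => ?_, h.2⟩
        have := h.1 p hp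
        simp only [List.length_cons] at *
        push_cast at *
        omega

theorem fill_getElem? (v : Int) (lo hi : Int) (hlo : 0 ≤ lo) : ∀ (rp : List Int) (k : Nat),
    ((PySem.List.pyRange lo hi 1).foldl (fun r i => PySem.List.pySetD r i v) rp)[k]? =
    if lo ≤ (k : Int) ∧ (k : Int) < hi then rp[k]?.map (fun _ => v) else rp[k]? := by
  by_cases h : hi ≤ lo
  · intro rp k
    rw [PySem.List.pyRange_one_eq_nil h]
    simp only [List.foldl_nil]
    rw [if_neg (by omega)]
  · push Not at h
    have hd : (hi - (lo + 1)).toNat < (hi - lo).toNat := by omega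
    intro rp k
    rw [PySem.List.pyRange_one_cons h]
    simp only [List.foldl_cons]
    rw [fill_getElem? v (lo+1) hi (by omega) (PySem.List.pySetD rp lo v) k]
    rw [PySem.List.pySetD_of_nonneg rp v hlo]
    simp only [List.getElem?_set]
    rcases Nat.lt_or_ge k rp.length with hklen | hklen
    · have hsome : rp[k]? = some rp[k] := List.getElem?_eq_getElem hklen
      split_ifs with h1 h2 h3 h4 h5 <;> simp_all <;> omega
    · have hnone : rp[k]? = none := List.getElem?_eq_none hklen
      split_ifs with h1 h2 h3 h4 h5 <;> simp_all <;> omega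
termination_by (hi - lo).toNat
decreasing_by exact hd

def pvWriteA (rp : List Int) (cd ab : Int × Int) : List Int :=
  (PySem.List.pyRange ab.1 (ab.2 + 1) 1).foldl (fun r i => PySem.List.pySetD r i 1)
    ((PySem.List.pyRange cd.1 (cd.2 + 1) 1).foldl (fun r i => PySem.List.pySetD r i 0) rp)

theorem writeA_getElem? (rp : List Int) (c d a b : Int) (hc : 0 ≤ c) (hca : c ≤ a)
    (hbd : b ≤ d) (k : Nat) :
    (pvWriteA rp (c, d) (a, b))[k]? =
    if a ≤ (k : Int) ∧ (k : Int) ≤ b then rp[k]?.map (fun _ => (1 : Int))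
    else if c ≤ (k : Int) ∧ (k : Int) ≤ d then rp[k]?.map (fun _ => (0 : Int))
    else rp[k]? := by
  unfold pvWriteA
  rw [fill_getElem? 1 a (b+1) (by omega), fill_getElem? 0 c (d+1) hc]
  split_ifs with h1 h2 h3 h4 h5 <;> simp_all [Option.map_map] <;> try omega
  · rfl

def pvSlice (rp : List Int) (lo hi : Int) (v : Int) : List Int :=
  rp.take lo.toNat ++ List.replicate (hi - lo).toNat v ++ rp.drop hi.toNat

theorem slice_length (rp : List Int) (lo hi v : Int) (h0 : 0 ≤ lo) (h1 : lo ≤ hi)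
    (h2 : hi ≤ (rp.length : Int)) :
    (pvSlice rp lo hi v).length = rp.length := by
  unfold pvSlice
  simp [List.length_take, List.length_drop]
  omega

theorem slice_getElem? (rp : List Int) (lo hi v : Int) (h0 : 0 ≤ lo) (h1 : lo ≤ hi)
    (h2 : hi ≤ (rp.length : Int)) (k : Nat) :
    (pvSlice rp lo hi v)[k]? =
    if lo ≤ (k : Int) ∧ (k : Int) < hi then rp[k]?.map (fun _ => v) else rp[k]? := by
  unfold pvSlice
  rw [List.append_assoc]
  have hts : (rp.take lo.toNat).length = lo.toNat := by
    simp [List.length_take]; omega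
  rcases Nat.lt_or_ge k lo.toNat with hk | hk
  · rw [List.getElem?_append_left (by omega)]
    rw [List.getElem?_take]
    rw [if_pos hk, if_neg (by omega)]
  · rw [List.getElem?_append_right (by omega), hts]
    rcases Nat.lt_or_ge k hi.toNat with hk2 | hk2
    · rw [List.getElem?_append_left (by simp [List.length_replicate]; omega)]
      rw [List.getElem?_replicate, if_pos (by omega)]
      rw [if_pos (by omega)]
      have hklen : k < rp.length := by omega
      rw [List.getElem?_eq_getElem hklen]
      rfl
    · rw [List.getElem?_append_right (by simp [List.length_replicate]; omega)]
      rw [List.getElem?_drop]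
      simp only [List.length_replicate]
      rw [if_neg (by omega)]
      congr 1
      omega

theorem fillSeg_eq_slices (out : List Int) (c a b d : Int) :
    pvFillSeg out c a b d = pvSlice (pvSlice (pvSlice out c a 0) a (b + 1) 1) (b + 1) (d + 1) 0 := by
  unfold pvFillSeg pvSlice
  have : ((d : Int) - b).toNat = (d + 1 - (b + 1)).toNat := by omega
  rw [this]

theorem fillSeg_length (out : List Int) (c a b d : Int) (hc : 0 ≤ c) (hca : c ≤ a)
    (hab : a ≤ b + 1) (hbd : b ≤ d) (hd : d + 1 ≤ (out.length : Int)) :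
    (pvFillSeg out c a b d).length = out.length := by
  rw [fillSeg_eq_slices]
  have l1 := slice_length out c a 0 hc hca (by omega)
  have l2 := slice_length (pvSlice out c a 0) a (b+1) 1 (by omega) hab (by rw [l1]; omega)
  have l3 := slice_length (pvSlice (pvSlice out c a 0) a (b+1) 1) (b+1) (d+1) 0 (by omega)
    (by omega) (by rw [l2, l1]; omega)
  rw [l3, l2, l1]

theorem fillSeg_getElem? (out : List Int) (c a b d : Int) (hc : 0 ≤ c) (hca : c ≤ a)
    (hab : a ≤ b + 1) (hbd : b ≤ d) (hd : d + 1 ≤ (out.length : Int)) (k : Nat) :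
    (pvFillSeg out c a b d)[k]? =
    if a ≤ (k : Int) ∧ (k : Int) ≤ b then out[k]?.map (fun _ => (1 : Int))
    else if c ≤ (k : Int) ∧ (k : Int) ≤ d then out[k]?.map (fun _ => (0 : Int))
    else out[k]? := by
  rw [fillSeg_eq_slices]
  have l1 := slice_length out c a 0 hc hca (by omega)
  have l2 := slice_length (pvSlice out c a 0) a (b+1) 1 (by omega) hab (by rw [l1]; omega)
  rw [slice_getElem? _ (b+1) (d+1) 0 (by omega) (by omega) (by rw [l2, l1]; omega) k]
  rw [slice_getElem? _ a (b+1) 1 (by omega) hab (by rw [l1]; omega) k]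
  rw [slice_getElem? out c a 0 hc hca (by omega) k]
  split_ifs <;> simp_all [Option.map_map] <;> try omega
  all_goals rfl

def containsB (cd ab : Int × Int) : Bool := decide (cd.1 ≤ ab.1 ∧ ab.2 ≤ cd.2)

def specAt (Lv Pv : List (Int × Int)) (k : Int) (ov : Option Int) : Option Int :=
  match Pv.find? (fun cd => decide (cd.1 ≤ k ∧ k ≤ cd.2)) with
  | none => ov
  | some cd =>
    match (Lv.filter (fun ab => containsB cd ab)).getLast? with
    | none => ov
    | some ab => if ab.1 ≤ k ∧ k ≤ ab.2 then ov.map (fun _ => 1) else ov.map (fun _ => 0)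

theorem specAt_map (Lv Pv : List (Int × Int)) (k : Int) (ov : Option Int) (w : Int) :
    (specAt Lv Pv k ov).map (fun _ => w) = ov.map (fun _ => w) := by
  unfold specAt
  rcases hf : Pv.find? (fun cd => decide (cd.1 ≤ k ∧ k ≤ cd.2)) with _ | cd
  · simp only [hf]
  · simp only [hf]
    rcases hg : (Lv.filter (fun ab => containsB cd ab)).getLast? with _ | ab
    · simp only [hg]
    · simp only [hg]
      by_cases h : ab.1 ≤ k ∧ k ≤ ab.2 <;> simp [h, Option.map_map] <;> rfl

theorem pairwise_cases {α : Type} {R : α → α → Prop} : ∀ {l : List α}, l.Pairwise R →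
    ∀ {a b : α}, a ∈ l → b ∈ l → a = b ∨ R a b ∨ R b a := by
  intro l hl
  induction hl with
  | nil => intro a b ha; cases ha
  | cons hhead _ ih =>
    intro a b ha hb
    rcases List.mem_cons.mp ha with rfl | ha' <;> rcases List.mem_cons.mp hb with rfl | hb'
    · exact Or.inl rfl
    · exact Or.inr (Or.inl (hhead b hb'))
    · exact Or.inr (Or.inr (hhead a ha'))
    · exact ih ha' hb'

theorem find?_unique {α : Type} {p : α → Bool} {x : α} : ∀ {l : List α}, x ∈ l → p x = true →
    (∀ y ∈ l, p y = true → y = x) → l.find? p = some x := by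
  intro l
  induction l with
  | nil => intro h; cases h
  | cons y t ih =>
    intro hx hp huniq
    by_cases hy : p y = true
    · have hxy : y = x := huniq y List.mem_cons_self hy
      subst hxy
      rw [List.find?_cons_of_pos hy]
    · have hx' : x ∈ t := by
        rcases List.mem_cons.mp hx with rfl | h
        · exact absurd hp hy
        · exact h
      rw [List.find?_cons_of_neg (by simpa using hy)]
      exact ih hx' hp (fun z hz hpz => huniq z (List.mem_cons_of_mem _ hz) hpz)

theorem getLast?_cons_or {α : Type} (x : α) : ∀ (l : List α), (x :: l).getLast? = l.getLast?.or (some x) := by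
  intro l
  induction l generalizing x with
  | nil => rfl
  | cons y t ih =>
    rw [List.getLast?_cons_cons, ih y]
    cases ht : t.getLast? <;> simp [List.getLast?_cons_cons, ih y, ht]

theorem pvScan_spec (c d : Int) : ∀ (Lrem : List (Int × Int)) (b0 : Option (Int × Int)),
    pvScan c d b0 Lrem =
    (((Lrem.takeWhile (fun p => decide (p.2 ≤ d))).filter (fun p => decide (c ≤ p.1))).getLast?.or b0,
     Lrem.dropWhile (fun p => decide (p.2 ≤ d))) := by
  intro Lrem
  induction Lrem with
  | nil => intro b0; rfl
  | cons ab rest ih =>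
    intro b0
    by_cases h : ab.2 ≤ d
    · rw [List.takeWhile_cons_of_pos (by simpa using h), List.dropWhile_cons_of_pos (by simpa using h)]
      unfold pvScan
      rw [if_pos h, ih]
      by_cases hc : c ≤ ab.1
      · rw [List.filter_cons_of_pos (by simpa using hc), if_pos hc, getLast?_cons_or]
        cases hg : ((rest.takeWhile (fun p => decide (p.2 ≤ d))).filter (fun p => decide (c ≤ p.1))).getLast? <;> simp [hg]
      · rw [List.filter_cons_of_neg (by simpa using hc), if_neg hc]
    · rw [List.takeWhile_cons_of_neg (by simpa using h), List.dropWhile_cons_of_neg (by simpa using h)]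
      unfold pvScan
      rw [if_neg h]
      rfl

theorem takeWhile_eq_filter_sorted (d : Int) : ∀ (l : List (Int × Int)),
    l.Pairwise (fun p q => p.2 < q.1) → (∀ p ∈ l, p.1 ≤ p.2) →
    l.takeWhile (fun p => decide (p.2 ≤ d)) = l.filter (fun p => decide (p.2 ≤ d)) := by
  intro l
  induction l with
  | nil => intro _ _; rfl
  | cons x t ih =>
    intro hp hb
    rcases List.pairwise_cons.mp hp with ⟨hx, ht⟩
    by_cases h : x.2 ≤ d
    · rw [List.takeWhile_cons_of_pos (by simpa using h), List.filter_cons_of_pos (by simpa using h)]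
      rw [ih ht (fun p hp' => hb p (List.mem_cons_of_mem _ hp'))]
    · rw [List.takeWhile_cons_of_neg (by simpa using h), List.filter_cons_of_neg (by simpa using h)]
      symm
      rw [List.filter_eq_nil_iff]
      intro p hp'
      have h1 := hx p hp'
      have h2 := hb p (List.mem_cons_of_mem _ hp')
      simp
      omega

def pvApplyC (Lv : List (Int × Int)) (out : List Int) (cd : Int × Int) : List Int :=
  match (Lv.filter (fun ab => containsB cd ab)).getLast? with
  | some ab => pvFillSeg out cd.1 ab.1 ab.2 cd.2
  | none => out

theorem B_fold_eq (Lv : List (Int × Int)) (hLb : ∀ p ∈ Lv, p.1 ≤ p.2) :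
    ∀ (Pv : List (Int × Int)), Pv.Pairwise (fun p q => p.2 < q.1) → (∀ p ∈ Pv, p.1 ≤ p.2) →
    ∀ (Ldrop Lrem : List (Int × Int)) (out : List Int),
    Lv = Ldrop ++ Lrem →
    Lrem.Pairwise (fun p q => p.2 < q.1) →
    (∀ cd ∈ Pv, ∀ p ∈ Ldrop, p.2 < cd.1) →
    (Pv.foldl (fun (s : List Int × List (Int × Int)) cd =>
        match pvScan cd.1 cd.2 none s.2 with
        | (some ab, rest) => (pvFillSeg s.1 cd.1 ab.1 ab.2 cd.2, rest)
        | (none, rest) => (s.1, rest)) (out, Lrem)).1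
     = Pv.foldl (pvApplyC Lv) out := by
  intro Pv
  induction Pv with
  | nil => intro _ _ Ldrop Lrem out _ _ _; rfl
  | cons cd Pv' ih =>
    intro hPp hPb Ldrop Lrem out hsplit hLremP hdrop
    rcases List.pairwise_cons.mp hPp with ⟨hcd, hPp'⟩
    have hLremB : ∀ p ∈ Lrem, p.1 ≤ p.2 := by
      intro p hp
      exact hLb p (hsplit ▸ List.mem_append_right _ hp)
    have hfilters : Lv.filter (fun ab => containsB cd ab)
        = (Lrem.takeWhile (fun p => decide (p.2 ≤ cd.2))).filter (fun p => decide (cd.1 ≤ p.1)) := by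
      rw [takeWhile_eq_filter_sorted cd.2 Lrem hLremP hLremB, List.filter_filter]
      rw [hsplit, List.filter_append]
      have h1 : Ldrop.filter (fun ab => containsB cd ab) = [] := by
        rw [List.filter_eq_nil_iff]
        intro p hp
        have h2 := hdrop cd List.mem_cons_self p hp
        simp [containsB]
        intro h3
        have h4 := hLb p (hsplit ▸ List.mem_append_left _ hp)
        omega
      rw [h1, List.nil_append]
      apply List.filter_congr
      intro x _
      simp [containsB, Bool.and_comm]
    simp only [List.foldl_cons]
    rw [pvScan_spec]
    rw [← hfilters, Option.or_none]
    have hih := ih hPp' (fun p hp => hPb p (List.mem_cons_of_mem _ hp))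
      (Ldrop ++ Lrem.takeWhile (fun p => decide (p.2 ≤ cd.2)))
      (Lrem.dropWhile (fun p => decide (p.2 ≤ cd.2)))
    have hsplit' : Lv = (Ldrop ++ Lrem.takeWhile (fun p => decide (p.2 ≤ cd.2)))
        ++ Lrem.dropWhile (fun p => decide (p.2 ≤ cd.2)) := by
      rw [List.append_assoc, List.takeWhile_append_dropWhile, hsplit]
    have hLremP' : (Lrem.dropWhile (fun p => decide (p.2 ≤ cd.2))).Pairwise (fun p q => p.2 < q.1) :=
      List.Pairwise.sublist (List.dropWhile_sublist _) hLremP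
    have hdrop' : ∀ cd' ∈ Pv', ∀ p ∈ Ldrop ++ Lrem.takeWhile (fun p => decide (p.2 ≤ cd.2)),
        p.2 < cd'.1 := by
      intro cd' hcd' p hp
      rcases List.mem_append.mp hp with hp1 | hp2
      · exact hdrop cd' (List.mem_cons_of_mem _ hcd') p hp1
      · have h5 : p.2 ≤ cd.2 := by simpa using List.mem_takeWhile_imp hp2
        have h6 := hcd cd' hcd'
        omega
    rcases hg : (Lv.filter (fun ab => containsB cd ab)).getLast? with _ | ab
    · simp only [hg]
      rw [hih _ hsplit' hLremP' hdrop']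
      simp [pvApplyC, hg]
    · simp only [hg]
      rw [hih _ hsplit' hLremP' hdrop']
      simp [pvApplyC, hg]

theorem applyC_length (Lv : List (Int × Int)) (hLb : ∀ p ∈ Lv, p.1 ≤ p.2) (out : List Int)
    (cd : Int × Int) (h0 : 0 ≤ cd.1) (h1 : cd.1 ≤ cd.2) (h2 : cd.2 < (out.length : Int)) :
    (pvApplyC Lv out cd).length = out.length := by
  unfold pvApplyC
  rcases hg : (Lv.filter (fun ab => containsB cd ab)).getLast? with _ | ab
  · rfl
  · have hmem := List.mem_of_getLast? hg
    have hpred := List.of_mem_filter hmem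
    have hab := hLb ab (List.mem_of_mem_filter hmem)
    simp [containsB] at hpred
    exact fillSeg_length out cd.1 ab.1 ab.2 cd.2 h0 hpred.1 (by omega) hpred.2 (by omega)

theorem applyC_getElem? (Lv : List (Int × Int)) (hLb : ∀ p ∈ Lv, p.1 ≤ p.2) (out : List Int)
    (cd : Int × Int) (h0 : 0 ≤ cd.1) (h1 : cd.1 ≤ cd.2) (h2 : cd.2 < (out.length : Int)) (k : Nat) :
    (pvApplyC Lv out cd)[k]? =
    match (Lv.filter (fun ab => containsB cd ab)).getLast? with
    | none => out[k]?
    | some ab =>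
      if ab.1 ≤ (k : Int) ∧ (k : Int) ≤ ab.2 then out[k]?.map (fun _ => (1 : Int))
      else if cd.1 ≤ (k : Int) ∧ (k : Int) ≤ cd.2 then out[k]?.map (fun _ => (0 : Int))
      else out[k]? := by
  unfold pvApplyC
  rcases hg : (Lv.filter (fun ab => containsB cd ab)).getLast? with _ | ab
  · rfl
  · have hmem := List.mem_of_getLast? hg
    have hpred := List.of_mem_filter hmem
    have hab := hLb ab (List.mem_of_mem_filter hmem)
    simp [containsB] at hpred
    exact fillSeg_getElem? out cd.1 ab.1 ab.2 cd.2 h0 hpred.1 (by omega) hpred.2 (by omega) k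

theorem C_getElem? (Lv : List (Int × Int)) (hLb : ∀ p ∈ Lv, p.1 ≤ p.2) :
    ∀ (Pv : List (Int × Int)), Pv.Pairwise (fun p q => p.2 < q.1) →
    ∀ (out : List Int), (∀ p ∈ Pv, 0 ≤ p.1 ∧ p.1 ≤ p.2 ∧ p.2 < (out.length : Int)) →
    ∀ (k : Nat), (Pv.foldl (pvApplyC Lv) out)[k]? = specAt Lv Pv (k : Int) out[k]? := by
  intro Pv
  induction Pv with
  | nil =>
    intro _ out _ k
    rfl
  | cons cd Pv' ih =>
    intro hPp out hPb k
    rcases List.pairwise_cons.mp hPp with ⟨hcd, hPp'⟩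
    obtain ⟨hb0, hb1, hb2⟩ := hPb cd List.mem_cons_self
    have hlen1 : (pvApplyC Lv out cd).length = out.length :=
      applyC_length Lv hLb out cd hb0 hb1 hb2
    simp only [List.foldl_cons]
    rw [ih hPp' (pvApplyC Lv out cd)
      (fun p hp => by rw [hlen1]; exact hPb p (List.mem_cons_of_mem _ hp)) k]
    have hap := applyC_getElem? Lv hLb out cd hb0 hb1 hb2 k
    unfold specAt
    by_cases hk : cd.1 ≤ (k : Int) ∧ (k : Int) ≤ cd.2
    · rw [List.find?_cons_of_pos (by simpa using hk)]
      have hnone : Pv'.find? (fun cd' => decide (cd'.1 ≤ (k : Int) ∧ (k : Int) ≤ cd'.2)) = none := by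
        rw [List.find?_eq_none]
        intro cd' hcd'
        have := hcd cd' hcd'
        simp
        omega
      rw [hnone]
      simp only
      rw [hap]
      rcases hg : (Lv.filter (fun ab => containsB cd ab)).getLast? with _ | ab
      · rfl
      · simp only
        have hmem := List.mem_of_getLast? hg
        have hpred := List.of_mem_filter hmem
        simp [containsB] at hpred
        by_cases hab : ab.1 ≤ (k : Int) ∧ (k : Int) ≤ ab.2
        · rw [if_pos hab, if_pos hab]
        · rw [if_neg hab, if_neg hab, if_pos hk]
    · rw [List.find?_cons_of_neg (by simpa using hk)]
      have hsame : (pvApplyC Lv out cd)[k]? = out[k]? := by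
        rw [hap]
        rcases hg : (Lv.filter (fun ab => containsB cd ab)).getLast? with _ | ab
        · rfl
        · simp only
          have hmem := List.mem_of_getLast? hg
          have hpred := List.of_mem_filter hmem
          simp [containsB] at hpred
          rw [if_neg (by omega), if_neg hk]
      rw [hsame]

theorem inner_fold_eq (ab : Int × Int) (hab : ab.1 ≤ ab.2) :
    ∀ (Pv : List (Int × Int)), Pv.Pairwise (fun p q => p.2 < q.1) →
    ∀ (rp : List Int),
    Pv.foldl (fun rp cd =>
        if cd.1 ≤ ab.1 ∧ cd.2 ≥ ab.2 then pvWriteA rp cd ab else rp) rp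
      = match Pv.find? (fun cd => containsB cd ab) with
        | some cd => pvWriteA rp cd ab
        | none => rp := by
  intro Pv
  induction Pv with
  | nil => intro _ rp; rfl
  | cons cd Pv' ih =>
    intro hPp rp
    rcases List.pairwise_cons.mp hPp with ⟨hcd, hPp'⟩
    simp only [List.foldl_cons]
    by_cases h : cd.1 ≤ ab.1 ∧ cd.2 ≥ ab.2
    · rw [if_pos h, List.find?_cons_of_pos (by simp [containsB]; exact ⟨h.1, h.2⟩)]
      simp only
      rw [PySem.List.foldl_ite_eq_foldl_filter]
      have hnil : Pv'.filter (fun cd' => decide (cd'.1 ≤ ab.1 ∧ cd'.2 ≥ ab.2)) = [] := by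
        rw [List.filter_eq_nil_iff]
        intro cd' hcd'
        have := hcd cd' hcd'
        simp
        intro h1
        have := h.1
        have := h.2
        omega
      rw [hnil]
      rfl
    · rw [if_neg h, List.find?_cons_of_neg (by simp only [containsB, decide_eq_true_eq]; exact fun hc => h ⟨hc.1, hc.2⟩)]
      exact ih hPp' rp

theorem writeA_getElem?' (rp : List Int) (cd ab : Int × Int) (hc : 0 ≤ cd.1)
    (hca : cd.1 ≤ ab.1) (hbd : ab.2 ≤ cd.2) (k : Nat) :
    (pvWriteA rp cd ab)[k]? =
    if ab.1 ≤ (k : Int) ∧ (k : Int) ≤ ab.2 then rp[k]?.map (fun _ => (1 : Int))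
    else if cd.1 ≤ (k : Int) ∧ (k : Int) ≤ cd.2 then rp[k]?.map (fun _ => (0 : Int))
    else rp[k]? := by
  obtain ⟨c, d⟩ := cd
  obtain ⟨a, b⟩ := ab
  exact writeA_getElem? rp c d a b hc hca hbd k

theorem A_fold_getElem? (Pv : List (Int × Int)) (hPp : Pv.Pairwise (fun p q => p.2 < q.1))
    (hPb : ∀ p ∈ Pv, 0 ≤ p.1 ∧ p.1 ≤ p.2) :
    ∀ (Lv : List (Int × Int)), (∀ p ∈ Lv, p.1 ≤ p.2) →
    ∀ (predict : List Int) (k : Nat),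
    (Lv.foldl (fun rp ab => Pv.foldl (fun rp cd =>
        if cd.1 ≤ ab.1 ∧ cd.2 ≥ ab.2 then pvWriteA rp cd ab else rp) rp) predict)[k]?
      = specAt Lv Pv (k : Int) predict[k]? := by
  intro Lv
  induction Lv using List.reverseRecOn with
  | nil =>
    intro _ predict k
    unfold specAt
    rcases hf : Pv.find? (fun cd => decide (cd.1 ≤ (k : Int) ∧ (k : Int) ≤ cd.2)) with _ | cd <;>
      rw [hf] <;> rfl
  | append_singleton L' ab ih =>
    intro hLb predict k
    have hab : ab.1 ≤ ab.2 := hLb ab (List.mem_append_right _ List.mem_cons_self)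
    have hLb' : ∀ p ∈ L', p.1 ≤ p.2 := fun p hp => hLb p (List.mem_append_left _ hp)
    rw [List.foldl_append]
    simp only [List.foldl_cons, List.foldl_nil]
    rw [inner_fold_eq ab hab Pv hPp]
    rcases hf : Pv.find? (fun cd => containsB cd ab) with _ | cd'
    · simp only
      rw [ih hLb' predict k]
      unfold specAt
      rcases hfp : Pv.find? (fun cd => decide (cd.1 ≤ (k : Int) ∧ (k : Int) ≤ cd.2)) with _ | cd0
      · simp only [hfp]
      · simp only [hfp]
        have hnab : containsB cd0 ab = false := by
          have := List.find?_eq_none.mp hf cd0 (List.mem_of_find?_eq_some hfp)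
          simpa using this
        rw [List.filter_append]
        have : [ab].filter (fun x => containsB cd0 x) = [] := by
          simp [hnab]
        rw [this, List.append_nil]
    · simp only
      have hp' := List.find?_some hf
      have hmem' : cd' ∈ Pv := List.mem_of_find?_eq_some hf
      obtain ⟨hc0, hc1⟩ := hPb cd' hmem'
      simp only [containsB, decide_eq_true_eq] at hp'
      rw [writeA_getElem?' _ cd' ab hc0 hp'.1 hp'.2 k]
      by_cases hkin : cd'.1 ≤ (k : Int) ∧ (k : Int) ≤ cd'.2
      · have hfindpt : Pv.find? (fun cd => decide (cd.1 ≤ (k : Int) ∧ (k : Int) ≤ cd.2)) = some cd' := by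
          apply find?_unique hmem' (by simpa using hkin)
          intro y hy hpy
          simp only [decide_eq_true_eq] at hpy
          rcases pairwise_cases hPp hy hmem' with h | h | h
          · exact h
          · exfalso; omega
          · exfalso; omega
        unfold specAt
        rw [hfindpt]
        simp only
        rw [List.filter_append]
        have : [ab].filter (fun x => containsB cd' x) = [ab] := by
          simp [containsB, hp'.1, hp'.2]
        rw [this, List.getLast?_concat]
        simp only
        by_cases hab2 : ab.1 ≤ (k : Int) ∧ (k : Int) ≤ ab.2
        · rw [if_pos hab2, if_pos hab2, ih hLb' predict k, specAt_map]
        · rw [if_neg hab2, if_neg hab2, if_pos hkin, ih hLb' predict k, specAt_map]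
      · rw [if_neg (by omega), if_neg hkin, ih hLb' predict k]
        unfold specAt
        rcases hfp : Pv.find? (fun cd => decide (cd.1 ≤ (k : Int) ∧ (k : Int) ≤ cd.2)) with _ | cd0
        · simp only [hfp]
        · simp only [hfp]
          have hk0 : cd0.1 ≤ (k : Int) ∧ (k : Int) ≤ cd0.2 := by
            simpa using List.find?_some hfp
          have hmem0 : cd0 ∈ Pv := List.mem_of_find?_eq_some hfp
          have hnab : containsB cd0 ab = false := by
            simp only [containsB, decide_eq_false_iff_not]
            intro hcon
            rcases pairwise_cases hPp hmem0 hmem' with h | h | h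
            · subst h; exact hkin hk0
            · omega
            · omega
          rw [List.filter_append]
          have : [ab].filter (fun x => containsB cd0 x) = [] := by simp [hnab]
          rw [this, List.append_nil]

theorem pv_final (label : List Int) (predict : List Int) :
    refine_prediction label predict = refine_prediction_alt label predict := by
  have hL := ivRec_props label 0 none le_rfl (by intro st h; cases h)
  have hP := ivRec_props predict 0 none le_rfl (by intro st h; cases h)
  have hLb : ∀ p ∈ ivRec label 0 none, p.1 ≤ p.2 := fun p hp => (hL.1 p hp).2.2.1
  have hPb : ∀ p ∈ ivRec predict 0 none, 0 ≤ p.1 ∧ p.1 ≤ p.2 :=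
    fun p hp => ⟨(hP.1 p hp).2.1, (hP.1 p hp).2.2.1⟩
  have hPbound : ∀ p ∈ ivRec predict 0 none,
      0 ≤ p.1 ∧ p.1 ≤ p.2 ∧ p.2 < (predict.length : Int) := by
    intro p hp
    have := hP.1 p hp
    refine ⟨this.2.1, this.2.2.1, by have := this.2.2.2; omega⟩
  have haveA : refine_prediction label predict
      = (ivRec label 0 none).foldl (fun rp ab => (ivRec predict 0 none).foldl (fun rp cd =>
          if cd.1 ≤ ab.1 ∧ cd.2 ≥ ab.2 then pvWriteA rp cd ab else rp) rp) predict := by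
    unfold refine_prediction pvWriteA
    rw [intervalsA_eq_ivRec, intervalsA_eq_ivRec]
  have haveB : refine_prediction_alt label predict
      = (((ivRec predict 0 none).foldl
          (fun (s : List Int × List (Int × Int)) cd =>
            match pvScan cd.1 cd.2 none s.2 with
            | (some ab, rest) => (pvFillSeg s.1 cd.1 ab.1 ab.2 cd.2, rest)
            | (none, rest) => (s.1, rest))
          (predict, ivRec label 0 none)).1) := by
    unfold refine_prediction_alt
    rw [intervalsB_eq_ivRec, intervalsB_eq_ivRec]
  rw [haveA, haveB]
  rw [B_fold_eq (ivRec label 0 none) hLb (ivRec predict 0 none) hP.2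
    (fun p hp => (hPb p hp).2) [] (ivRec label 0 none) predict rfl hL.2
    (by intro cd hcd p hp; cases hp)]
  apply List.ext_getElem?
  intro k
  rw [A_fold_getElem? (ivRec predict 0 none) hP.2 hPb (ivRec label 0 none) hLb predict k]
  rw [C_getElem? (ivRec label 0 none) hLb (ivRec predict 0 none) hP.2 predict hPbound k]

-- ===== VERDICT (by name: the statement is the Claim_ definition above) =====
theorem refine_prediction_spec : Claim_equal_refine_prediction := by
  intro label predict _
  exact pv_final label predict
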